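-- pv_equiv track=rewrite | github.com/Radzhab2024/DS_Bootcamp_School21 | day1/ex01/read_and_write.py | replace_correctly
-- ===== SOURCE A (Python) =====
-- def replace_correctly(line):
--     result = []
--     is_inside_quotes = False
--
--     for char in line:
--         if char == '"':
--             is_inside_quotes = not is_inside_quotes
--             result.append(char)
--         elif char == ',' and not is_inside_quotes:
--             result.append('\t')
--         else:
--             result.append(char)
--     return ''.join(result).strip()
-- ===== SOURCE B (Python) =====
-- def replace_correctly(line):
--     # Split on '"': even-indexed segments are outside quotes, odd-indexed inside.
--     parts = line.split('"')
--     fixed = [''.join('\t' if ch == ',' else ch for ch in seg) if i % 2 == 0 else seg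
--              for i, seg in enumerate(parts)]
--     return '"'.join(fixed).strip()
-- ===== Notes on version B (the rewrite author's own statement) =====
-- stated objective: simpler
-- what changed: Replaces the char-by-char boolean quote-state machine with a split-on-quote / segment-parity decomposition: even-indexed segments of line.split('"') get ',' mapped to tab, odd ones are kept, rejoined with '"' and stripped.
import Mathlib
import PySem

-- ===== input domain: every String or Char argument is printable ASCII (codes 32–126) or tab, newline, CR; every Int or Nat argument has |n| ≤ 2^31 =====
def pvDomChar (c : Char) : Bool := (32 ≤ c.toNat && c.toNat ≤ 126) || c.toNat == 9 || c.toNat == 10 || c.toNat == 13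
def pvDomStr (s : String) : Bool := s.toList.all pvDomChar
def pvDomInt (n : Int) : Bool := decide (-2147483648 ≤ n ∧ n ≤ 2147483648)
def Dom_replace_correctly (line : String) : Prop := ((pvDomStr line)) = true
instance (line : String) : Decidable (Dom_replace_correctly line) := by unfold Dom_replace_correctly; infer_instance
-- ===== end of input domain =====

-- B replaces A's char-by-char quote-state machine by a split-on-'"' / segment-parity decomposition (same O(n) cost, simpler).


-- ===== PORT A =====
-- the loop body: one step per char, state = (result so far, is_inside_quotes)
def pvStepA (st : List Char × Bool) (char : Char) : List Char × Bool :=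
  if char = '"' then (st.1 ++ [char], !st.2)
  else if char = ',' ∧ st.2 = false then (st.1 ++ ['\t'], st.2)
  else (st.1 ++ [char], st.2)

def replace_correctly (line : String) : String :=
  let fin := line.toList.foldl pvStepA ([], false)
  String.ofList (PySem.Chars.strip fin.1)

-- ===== PORT B =====
-- 'seg.join comprehension' ('\t' if ch == ',' else ch)
def pvTab (ch : Char) : Char := if ch = ',' then '\t' else ch

def replace_correctly_alt (line : String) : String :=
  let parts := PySem.Chars.splitOn line.toList ['"']
  let fixed := (PySem.List.enumerate parts).map
    (fun p => if PySem.Int.mod p.1 2 = 0 then p.2.map pvTab else p.2)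
  String.ofList (PySem.Chars.strip (PySem.Chars.join ['"'] fixed))

-- ===== PRECONDITION & SPEC =====
def Spec_replace_correctly (line : String) (out : String) : Prop := out = replace_correctly_alt line
instance (line : String) (out : String) : Decidable (Spec_replace_correctly line out) := by unfold Spec_replace_correctly; infer_instance

-- ===== CLAIM (what is proved, stated in full; the proofs are below) =====
def Claim_equal_replace_correctly : Prop := ∀ (line : String), Dom_replace_correctly line → Spec_replace_correctly line (replace_correctly line)

-- ===== LEMMAS AND PROOFS =====

-- A's loop as a structural recursion on the char list (state = is_inside_quotes)
def pvProcA : List Char → Bool → List Char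
  | [], _ => []
  | c :: cs, b =>
    if c = '"' then c :: pvProcA cs (!b)
    else if c = ',' ∧ b = false then '\t' :: pvProcA cs b
    else c :: pvProcA cs b

theorem pvFoldA (l : List Char) (acc : List Char) (b : Bool) :
    (l.foldl pvStepA (acc, b)).1 = acc ++ pvProcA l b := by
  induction l generalizing acc b with
  | nil => simp [pvProcA]
  | cons c cs ih =>
    simp only [List.foldl_cons, pvStepA, pvProcA]
    split_ifs with h1 h2 <;> simp [ih]

-- str.split('"') as a structural recursion
def pvMapHead (f : List Char → List Char) : List (List Char) → List (List Char)
  | [] => []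
  | h :: t => f h :: t

def pvSplitQ : List Char → List (List Char)
  | [] => [[]]
  | c :: cs => if c = '"' then [] :: pvSplitQ cs else pvMapHead (c :: ·) (pvSplitQ cs)

theorem pvSplitQ_ne_nil (l : List Char) : pvSplitQ l ≠ [] := by
  induction l with
  | nil => simp [pvSplitQ]
  | cons c cs ih =>
    simp only [pvSplitQ]
    split_ifs
    · simp
    · cases h : pvSplitQ cs with
      | nil => exact absurd h ih
      | cons hd tl => simp [pvMapHead]

theorem pvGo_eq (fuel : Nat) (l cur : List Char) (acc : List (List Char)) (hf : l.length < fuel) :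
    PySem.Chars.splitOn.go ['"'] fuel l cur acc =
      acc.reverse ++ pvMapHead (cur.reverse ++ ·) (pvSplitQ l) := by
  induction fuel generalizing l cur acc with
  | zero => omega
  | succ fuel ih =>
    cases l with
    | nil => simp [PySem.Chars.splitOn.go, pvSplitQ, pvMapHead]
    | cons c rest =>
      by_cases hc : c = '"'
      · subst hc
        rw [show PySem.Chars.splitOn.go ['"'] (fuel+1) ('"' :: rest) cur acc
              = PySem.Chars.splitOn.go ['"'] fuel rest [] (cur.reverse :: acc) from by
            simp [PySem.Chars.splitOn.go, List.isPrefixOf]]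
        rw [ih rest [] (cur.reverse :: acc) (by simpa using Nat.lt_of_succ_lt_succ hf)]
        simp only [pvSplitQ, List.reverse_cons, List.reverse_nil,
          List.nil_append, List.append_assoc, List.singleton_append]
        cases pvSplitQ rest <;> simp [pvMapHead]
      · rw [show PySem.Chars.splitOn.go ['"'] (fuel+1) (c :: rest) cur acc
              = PySem.Chars.splitOn.go ['"'] fuel rest (c :: cur) acc from by
            simp only [PySem.Chars.splitOn.go, List.isPrefixOf, Bool.and_eq_true, beq_iff_eq]
            rw [if_neg (by simp; exact fun h => absurd h.symm hc)]]
        rw [ih rest (c :: cur) acc (by simpa using Nat.lt_of_succ_lt_succ hf)]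
        simp only [pvSplitQ, if_neg hc]
        obtain ⟨h, t, he⟩ : ∃ h t, pvSplitQ rest = h :: t := by
          cases hh : pvSplitQ rest with
          | nil => exact absurd hh (pvSplitQ_ne_nil rest)
          | cons h t => exact ⟨h, t, rfl⟩
        simp [he, pvMapHead]

theorem pvSplitOn_eq (l : List Char) : PySem.Chars.splitOn l ['"'] = pvSplitQ l := by
  rw [show PySem.Chars.splitOn l ['"'] = PySem.Chars.splitOn.go ['"'] (l.length + 1) l [] [] from rfl]
  rw [pvGo_eq (l.length + 1) l [] [] (by omega)]
  obtain ⟨h, t, he⟩ : ∃ h t, pvSplitQ l = h :: t := by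
    cases hh : pvSplitQ l with
    | nil => exact absurd hh (pvSplitQ_ne_nil l)
    | cons h t => exact ⟨h, t, rfl⟩
  simp [he, pvMapHead]

-- alternate map: b = currently inside quotes (true on odd-indexed segments)
def pvApplyAlt : List (List Char) → Bool → List (List Char)
  | [], _ => []
  | seg :: rest, b => (if b then seg else seg.map pvTab) :: pvApplyAlt rest (!b)

theorem pvEnum_eq_applyAlt (parts : List (List Char)) (n : Int) :
    (PySem.List.enumerate parts n).map
        (fun p => if PySem.Int.mod p.1 2 = 0 then p.2.map pvTab else p.2)
      = pvApplyAlt parts (PySem.Int.mod n 2 = 1) := by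
  induction parts generalizing n with
  | nil => simp [PySem.List.enumerate, pvApplyAlt]
  | cons seg rest ih =>
    simp only [PySem.List.enumerate, List.map_cons, pvApplyAlt, ih (n + 1)]
    simp only [PySem.Int.mod_eq_emod_of_pos (b := 2) (by norm_num)]
    have h1 : (n + 1) % 2 = 1 - n % 2 := by omega
    congr 1
    · rcases Int.emod_two_eq n with h | h <;> simp [h]
    · congr 1
      rcases Int.emod_two_eq n with h | h <;> simp [h, h1]

theorem pvJoin_cons_head (c : Char) (h : List Char) (t : List (List Char)) :
    PySem.Chars.join ['"'] ((c :: h) :: t) = c :: PySem.Chars.join ['"'] (h :: t) := by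
  cases t with
  | nil => simp [PySem.Chars.join, List.intercalate]
  | cons q r => rw [PySem.Chars.join_cons_cons, PySem.Chars.join_cons_cons]; simp

theorem pvMain (l : List Char) (b : Bool) :
    PySem.Chars.join ['"'] (pvApplyAlt (pvSplitQ l) b) = pvProcA l b := by
  induction l generalizing b with
  | nil => simp [pvSplitQ, pvApplyAlt, pvProcA, PySem.Chars.join, List.intercalate]
  | cons c cs ih =>
    by_cases hc : c = '"'
    · subst hc
      simp only [pvSplitQ, pvApplyAlt, pvProcA, if_pos]
      rw [show (if b then ([] : List Char) else List.map pvTab []) = [] from by cases b <;> simp]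
      obtain ⟨h, t, he⟩ : ∃ h t, pvApplyAlt (pvSplitQ cs) (!b) = h :: t := by
        cases hq : pvSplitQ cs with
        | nil => exact absurd hq (pvSplitQ_ne_nil cs)
        | cons h t => exact ⟨_, _, rfl⟩
      rw [he, PySem.Chars.join_cons_cons, ← he, ih (!b)]
      simp
    · simp only [pvSplitQ, if_neg hc, pvProcA]
      obtain ⟨h, t, he⟩ : ∃ h t, pvSplitQ cs = h :: t := by
        cases hq : pvSplitQ cs with
        | nil => exact absurd hq (pvSplitQ_ne_nil cs)
        | cons h t => exact ⟨h, t, rfl⟩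
      rw [he]
      simp only [pvMapHead, pvApplyAlt]
      have hx : (if b then c :: h else (c :: h).map pvTab)
          = (if b then c else pvTab c) :: (if b then h else h.map pvTab) := by
        cases b <;> simp
      rw [hx, pvJoin_cons_head]
      have : PySem.Chars.join ['"'] ((if b then h else h.map pvTab) :: pvApplyAlt t (!b))
          = pvProcA cs b := by rw [← ih b, he]; simp [pvApplyAlt]
      rw [this]
      cases b with
      | false =>
        by_cases hcm : c = ','
        · simp [pvTab, hcm]
        · simp [pvTab, hcm]
      | true => simp

-- ===== VERDICT (by name: the statement is the Claim_ definition above) =====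
theorem replace_correctly_spec : Claim_equal_replace_correctly := by
  intro line _
  show replace_correctly line = replace_correctly_alt line
  unfold replace_correctly replace_correctly_alt
  simp only [pvSplitOn_eq, pvEnum_eq_applyAlt, pvFoldA, List.nil_append]
  rw [pvMain]
  norm_num [show PySem.Int.mod 0 2 = 0 from rfl]
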